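-- pv_equiv track=rewrite | github.com/vecvedant/CompiSmart_public | backend/app/routes/build.py | _title_from
-- ===== SOURCE A (Python) =====
-- def _title_from(md: str) -> str:
--     """Pick a title: first H1, else first non-empty line, capped."""
--     for line in md.splitlines():
--         s = line.strip()
--         if s.startswith("# "):
--             return s[2:].strip()[:200]
--     for line in md.splitlines():
--         s = line.strip()
--         if s:
--             return s[:200]
--     return "Untitled draft"
-- ===== SOURCE B (Python) =====
-- def _title_from(md: str) -> str:
--     """Pick a title: first H1, else first non-empty line, capped."""
--     first_nonempty = None
--     for line in md.splitlines():
--         s = line.strip()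
--         if s.startswith("# "):
--             return s[2:].strip()[:200]
--         if s and first_nonempty is None:
--             first_nonempty = s[:200]
--     return first_nonempty if first_nonempty is not None else "Untitled draft"
-- ===== Notes on version B (the rewrite author's own statement) =====
-- stated objective: simpler
-- what changed: Fuses A's two separate scans of md.splitlines() into one pass that tracks the first non-empty line as a fallback while searching for the first H1.
import Mathlib
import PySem

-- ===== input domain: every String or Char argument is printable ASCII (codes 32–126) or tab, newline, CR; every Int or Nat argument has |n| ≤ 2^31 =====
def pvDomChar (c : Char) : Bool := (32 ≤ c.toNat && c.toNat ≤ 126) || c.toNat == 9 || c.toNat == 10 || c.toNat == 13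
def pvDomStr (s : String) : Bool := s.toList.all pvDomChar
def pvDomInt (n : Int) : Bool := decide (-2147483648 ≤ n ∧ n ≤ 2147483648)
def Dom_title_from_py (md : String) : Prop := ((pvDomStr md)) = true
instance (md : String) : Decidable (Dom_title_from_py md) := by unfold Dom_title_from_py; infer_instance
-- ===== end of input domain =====

-- B fuses A's two scans of md.splitlines() into a single pass tracking the fallback; simpler, same cost.

-- ===== PORT A =====
-- first loop of A: return the first H1 title, if any
def pvH1Scan : List String → Option String
  | [] => none
  | line :: rest =>
    let s := PySem.Str.strip line
    if PySem.Str.startswith s "# " then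
      some (PySem.Str.slice (PySem.Str.strip (PySem.Str.slice s (some 2) none)) none (some 200))
    else pvH1Scan rest

-- second loop of A: return the first non-empty stripped line capped, else the default
def pvNeScan : List String → String
  | [] => "Untitled draft"
  | line :: rest =>
    let s := PySem.Str.strip line
    if s ≠ "" then PySem.Str.slice s none (some 200) else pvNeScan rest

def title_from_py (md : String) : String :=
  match pvH1Scan (PySem.Str.splitlines md) with
  | some t => t
  | none => pvNeScan (PySem.Str.splitlines md)

-- ===== PORT B =====
-- single loop of B, carrying first_nonempty
def pvAltLoop : List String → Option String → String
  | [], fn => match fn with | some t => t | none => "Untitled draft"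
  | line :: rest, fn =>
    let s := PySem.Str.strip line
    if PySem.Str.startswith s "# " then
      PySem.Str.slice (PySem.Str.strip (PySem.Str.slice s (some 2) none)) none (some 200)
    else
      pvAltLoop rest (if s ≠ "" ∧ fn = none then some (PySem.Str.slice s none (some 200)) else fn)

def title_from_py_alt (md : String) : String := pvAltLoop (PySem.Str.splitlines md) none

-- ===== PRECONDITION & SPEC =====
def Spec_title_from_py (md : String) (out : String) : Prop := out = title_from_py_alt md
instance (md : String) (out : String) : Decidable (Spec_title_from_py md out) := by unfold Spec_title_from_py; infer_instance

-- ===== CLAIM (what is proved, stated in full; the proofs are below) =====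
def Claim_equal_title_from_py : Prop := ∀ (md : String), Dom_title_from_py md → Spec_title_from_py md (title_from_py md)

-- ===== LEMMAS AND PROOFS =====
theorem pvAltLoop_eq (ls : List String) (fn : Option String) :
    pvAltLoop ls fn =
      match pvH1Scan ls with
      | some t => t
      | none => match fn with | some t => t | none => pvNeScan ls := by
  induction ls generalizing fn with
  | nil => cases fn <;> rfl
  | cons line rest ih =>
    simp only [pvAltLoop, pvH1Scan, pvNeScan]
    by_cases h1 : PySem.Chars.startswith (PySem.Chars.strip line.toList) ['#', ' '] = true
    · simp [h1]
    · by_cases hs : PySem.Str.strip line = ""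
      · cases fn <;> simp [hs, ih, PySem.Chars.startswith]
      · cases fn <;> simp [h1, hs, ih]

-- ===== VERDICT (by name: the statement is the Claim_ definition above) =====
theorem title_from_py_spec : Claim_equal_title_from_py := by
  intro md _
  unfold Spec_title_from_py title_from_py title_from_py_alt
  rw [pvAltLoop_eq]
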